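-- pv_equiv track=rewrite | github.com/JohannesWeinbrecht/pyHamming | util.py | xor_multiple_bool_list
-- ===== SOURCE A (Python) =====
-- def xor_bool_list(data1: list[bool], data2: list[bool]) -> list[bool]:
--     tuple_list = zip(data1, data2)
--     result = []
--     for i, d in enumerate(tuple_list):
--         result.append(d[0] != d[1])
--
--     return result
--
-- def xor_multiple_bool_list(data: list[list[bool]]) -> list[bool]:
--     if len(data) == 1:
--         return data[0]
--
--     max_length = len(data[0])
--     for d in data:
--         if len(d) > max_length:
--             max_length = len(d)
--     for i in range(len(data)):
--         while len(data[i]) < max_length: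
--             data[i].append(False)
--
--     result = data[0]
--     for i in range(1, len(data)):
--         result = xor_bool_list(result, data[i])
--     return result
-- ===== SOURCE B (Python) =====
-- # Column-major re-implementation: output bit i is the parity of column i over all
-- # lists (missing entries count as False). Return value equals A's; unlike A, B does
-- # not pad-mutate the input sublists (return-value equivalence only).
-- def xor_multiple_bool_list(data: list[list[bool]]) -> list[bool]:
--     n = max(len(d) for d in data)
--     return [sum(d[i] for d in data if i < len(d)) % 2 == 1 for i in range(n)]
-- ===== Notes on version B (the rewrite author's own statement) =====
-- stated objective: simpler
-- what changed: Replaces A's pad-in-place loop plus N-1 sequential pairwise xor_bool_list passes with a single column-major comprehension: output bit i is the parity of the count of True entries in column i (missing entries count as False); B does not mutate the input sublists (return-value equivalence).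
-- outside the precondition, e.g. on xor_multiple_bool_list([]): A raises IndexError, B raises ValueError
import Mathlib
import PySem

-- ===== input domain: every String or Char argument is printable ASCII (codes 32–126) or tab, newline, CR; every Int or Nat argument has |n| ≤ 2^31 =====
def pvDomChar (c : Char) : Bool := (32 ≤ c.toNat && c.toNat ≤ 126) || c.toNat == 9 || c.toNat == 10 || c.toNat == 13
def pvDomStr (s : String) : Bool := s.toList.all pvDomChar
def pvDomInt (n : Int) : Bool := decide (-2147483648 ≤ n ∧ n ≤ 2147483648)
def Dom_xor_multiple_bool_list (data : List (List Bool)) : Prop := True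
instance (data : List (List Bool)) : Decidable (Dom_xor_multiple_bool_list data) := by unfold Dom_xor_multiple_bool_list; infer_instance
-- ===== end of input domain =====

-- B computes the result column-major (output bit i = parity of column i, missing entries
-- counting as False) instead of A's N-1 sequential pairwise XOR passes; return-value
-- equivalence only: A pads the input sublists in place, B does not mutate its argument.

-- ===== PORT A =====

-- the 'while len(data[i]) < max_length: data[i].append(False)' loop
def pvPad (d : List Bool) (n : Nat) : List Bool :=
  if d.length < n then pvPad (d ++ [false]) n else d
termination_by n - d.length
decreasing_by simp; omega

def xorBoolList (data1 data2 : List Bool) : List Bool :=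
  (List.zip data1 data2).foldl (fun res p => res ++ [p.1 != p.2]) []

def xor_multiple_bool_list (data : List (List Bool)) : List Bool :=
  if data.length == 1 then data.headD []
  else
    let max_length := data.foldl (fun m d => if d.length > m then d.length else m)
      (data.headD []).length
    let padded := data.map (fun d => pvPad d max_length)
    match padded with
    | [] => []
    | r :: rest => rest.foldl (fun res d => xorBoolList res d) r

-- ===== PORT B =====
def xor_multiple_bool_list_alt (data : List (List Bool)) : List Bool :=
  let n := (PySem.List.max? (data.map (fun d => d.length)) (fun y => y)).getD 0
  (List.range n).map (fun i =>
    (data.foldl (fun s d => if i < d.length then s + (if d.getD i false then 1 else 0) else s)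
      0) % 2 == 1)

-- ===== PRECONDITION & SPEC =====
-- A raises IndexError on data = [] (data[0]); B raises ValueError there (max of empty).
def Pre_xor_multiple_bool_list (data : List (List Bool)) : Prop := data ≠ []
instance (data : List (List Bool)) : Decidable (Pre_xor_multiple_bool_list data) := by
  unfold Pre_xor_multiple_bool_list; infer_instance

def pvWitness_xor_multiple_bool_list : List (List Bool) := [[true, false], [true]]

def Spec_xor_multiple_bool_list (data : List (List Bool)) (out : List Bool) : Prop := out = xor_multiple_bool_list_alt data
instance (data : List (List Bool)) (out : List Bool) : Decidable (Spec_xor_multiple_bool_list data out) := by unfold Spec_xor_multiple_bool_list; infer_instance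

-- ===== CLAIM (what is proved, stated in full; the proofs are below) =====
def Claim_equal_xor_multiple_bool_list : Prop := ∀ (data : List (List Bool)), Dom_xor_multiple_bool_list data → Pre_xor_multiple_bool_list data → Spec_xor_multiple_bool_list data (xor_multiple_bool_list data)

-- ===== LEMMAS AND PROOFS =====

theorem pvPad_eq (d : List Bool) (n : Nat) :
    pvPad d n = d ++ List.replicate (n - d.length) false := by
  fun_induction pvPad d n with
  | case1 d h ih =>
      rw [ih]
      simp only [List.append_assoc, List.length_append, List.length_cons]
      have : n - d.length = (n - (d.length + 1)) + 1 := by omega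
      rw [this, List.replicate_succ]
      simp
  | case2 d h =>
      have : n - d.length = 0 := by omega
      simp [this]

theorem pvPad_getD (d : List Bool) (n i : Nat) :
    (pvPad d n).getD i false = d.getD i false := by
  rw [pvPad_eq]
  simp only [List.getD]
  by_cases hi : i < d.length
  · rw [List.getElem?_append_left hi]
  · rw [List.getElem?_append_right (by omega), List.getElem?_eq_none (by omega : d.length ≤ i)]
    simp [List.getElem?_replicate]
    split <;> simp

theorem pvPad_length (d : List Bool) (n : Nat) :
    (pvPad d n).length = max d.length n := by
  rw [pvPad_eq]; simp; omega

theorem xorBoolList_eq (d1 d2 : List Bool) :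
    xorBoolList d1 d2 = List.zipWith (fun a b => a != b) d1 d2 := by
  unfold xorBoolList
  rw [PySem.List.foldl_append_singleton_eq_map]
  simp only [List.nil_append]
  induction d1 generalizing d2 with
  | nil => simp
  | cons a l ih => cases d2 <;> simp [ih]

theorem range_map_getD (l : List Bool) :
    (List.range l.length).map (fun i => l.getD i false) = l := by
  apply List.ext_getElem
  · simp
  · intro i h1 h2
    simp [List.getD, List.getElem?_eq_getElem h2]

-- the pairwise xor fold, column by column
theorem fold_xor_cols (ds : List (List Bool)) (r : List Bool) (M : Nat)
    (hr : r.length = M) (hds : ∀ d ∈ ds, d.length = M) :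
    ds.foldl (fun res d => xorBoolList res d) r
      = (List.range M).map (fun i =>
          ds.foldl (fun b d => b != d.getD i false) (r.getD i false)) := by
  induction ds generalizing r with
  | nil =>
      simp only [List.foldl_nil]
      rw [← hr]
      exact (range_map_getD r).symm
  | cons d t ih =>
      simp only [List.foldl_cons]
      have hd : d.length = M := hds d (by simp)
      rw [xorBoolList_eq, ih _ (by simp [hr, hd]) (fun x hx => hds x (by simp [hx]))]
      apply List.map_congr_left
      intro i hi
      have hiM : i < M := List.mem_range.mp hi
      congr 1
      rw [List.getD_eq_getElem _ _ (by simp [hr, hd]; omega),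
        List.getD_eq_getElem _ _ (by omega), List.getD_eq_getElem _ _ (by omega)]
      simp

theorem foldl_bne_parity (l : List (List Bool)) (i : Nat) (b : Bool) :
    l.foldl (fun a d => a != d.getD i false) b
      = (((if b then 1 else 0) +
          l.foldl (fun s d => s + (if d.getD i false then 1 else 0)) 0) % 2 == 1) := by
  induction l generalizing b with
  | nil =>
      simp only [List.foldl_nil]
      cases b <;> simp
  | cons d t ih =>
      simp only [List.foldl_cons]
      rw [ih, PySem.List.foldl_add_nat, PySem.List.foldl_add_nat]
      cases b <;> cases hd : d.getD i false <;>
        simp <;> omega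

theorem foldl_max_eq (t : List (List Bool)) (a : Nat) :
    t.foldl (fun m d => if d.length > m then d.length else m) a
      = (t.map (fun d => d.length)).foldl max a := by
  induction t generalizing a with
  | nil => rfl
  | cons d t ih =>
      simp only [List.foldl_cons, List.map_cons, ih]
      congr 1
      rw [Nat.max_def]
      split_ifs <;> omega

-- B's guarded sum step adds exactly getD's value (out of range contributes 0)
theorem guard_step_eq (i : Nat) :
    (fun (s : Nat) (d : List Bool) =>
        if i < d.length then s + (if d.getD i false then 1 else 0) else s)
      = (fun s d => s + (if d.getD i false then 1 else 0)) := by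
  funext s d
  by_cases h : i < d.length
  · simp [h]
  · rw [List.getD_eq_default _ _ (by omega)]
    simp [h]

-- ===== VERDICT (by name: the statement is the Claim_ definition above) =====
theorem xor_multiple_bool_list_spec : Claim_equal_xor_multiple_bool_list := by
  intro data _ hpre
  unfold Spec_xor_multiple_bool_list
  match data with
  | [] => exact absurd rfl hpre
  | [h] =>
      -- A returns data[0] unchanged; B rebuilds the same list column by column
      unfold xor_multiple_bool_list xor_multiple_bool_list_alt
      simp only [List.length_cons, List.length_nil, List.map_cons, List.map_nil,
        PySem.List.max?_id_cons, List.foldl_nil, Option.getD_some, List.headD_cons,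
        List.foldl_cons, Nat.zero_add, beq_self_eq_true, if_true]
      conv_lhs => rw [← range_map_getD h]
      apply List.map_congr_left
      intro i hi
      have hiM : i < h.length := List.mem_range.mp hi
      cases hv : h.getD i false <;> simp [hv, hiM]
  | h :: d0 :: t0 =>
      set t : List (List Bool) := d0 :: t0 with ht
      unfold xor_multiple_bool_list xor_multiple_bool_list_alt
      simp only [List.map_cons, PySem.List.max?_id_cons, Option.getD_some, List.headD_cons]
      set M : Nat := (t.map (fun d => d.length)).foldl max h.length with hM
      have hMfold : (h :: t).foldl (fun m d => if d.length > m then d.length else m) h.length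
          = M := by
        rw [foldl_max_eq]; simp [hM]
      have hle : ∀ d ∈ h :: t, d.length ≤ M := by
        intro d hd
        rcases List.mem_cons.mp hd with h1 | h1
        · subst h1; exact (PySem.List.le_foldl_max _ _).1
        · exact (PySem.List.le_foldl_max (t.map (fun d => d.length)) h.length).2 _
            (List.mem_map.mpr ⟨d, h1, rfl⟩)
      have hlen1 : ((h :: t).length == 1) = false := by simp [ht]
      simp only [hlen1, Bool.false_eq_true, if_false]
      have hpadlen : ∀ d ∈ h :: t, (pvPad d M).length = M := by
        intro d hd; rw [pvPad_length]; have := hle d hd; omega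
      simp only [hMfold, List.map_cons]
      rw [fold_xor_cols (t.map (fun d => pvPad d M)) (pvPad h M) M
        (hpadlen h (by simp))
        (by intro d hd
            rcases List.mem_map.mp hd with ⟨x, hx, rfl⟩
            exact hpadlen x (by simp [hx]))]
      apply List.map_congr_left
      intro i hi
      rw [List.foldl_map]
      simp only [pvPad_getD]
      rw [foldl_bne_parity, guard_step_eq]
      simp only [ht, List.foldl_cons]
      rw [PySem.List.foldl_add_nat, PySem.List.foldl_add_nat]
      cases h.getD i false <;> cases d0.getD i false <;> simp <;> omega
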